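-- pv_equiv track=rewrite | github.com/Arthurlpgc/TCC-alpgc | drafts/minimizer.py | get_overlap
-- ===== SOURCE A (Python) =====
-- def process_overlap(overlap):
--   if len(overlap) == 0:
--     return {'size': 0, 'pos': 0}
--   covered = 0
--   size = 0
--   for minim in overlap:
--     size += minim[2]
--     size -= min(max(covered - minim[1], 0), minim[2])
--     covered = max(covered, minim[1] + minim[2])
--   return {'size': size, 'pos': overlap[len(overlap) // 2][0]}
--
-- def get_overlap(finger_print, cluster_threshold = 10):
--   finger_print = list(set(finger_print))
--   finger_print.sort()
--   best_overlap = {'size': 0, 'pos': 0}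
--   overlap = []
--   for fp in finger_print:
--     if len(overlap) == 0:
--       overlap.append(fp)
--     else:
--       if fp[0] - overlap[-1][0] > cluster_threshold:
--         overlap = process_overlap(overlap)
--         if overlap['size'] > best_overlap['size']:
--           best_overlap = overlap
--         overlap = [fp]
--       else:
--         overlap.append(fp)
--   overlap = process_overlap(overlap)
--   if overlap['size'] > best_overlap['size']:
--     best_overlap = overlap
--   return best_overlap
-- ===== SOURCE B (Python) =====
-- def get_overlap(finger_print, cluster_threshold = 10):
--   fps = sorted(set(finger_print))
--   best_size = 0
--   best_pos = 0
--   start = 0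
--   size = 0
--   covered = 0
--   prev = None
--   for i, fp in enumerate(fps):
--     if prev is not None and fp[0] - prev[0] > cluster_threshold:
--       if size > best_size:
--         best_size = size
--         best_pos = fps[(start + i) // 2][0]
--       start = i
--       size = 0
--       covered = 0
--     size += fp[2] - min(max(covered - fp[1], 0), fp[2])
--     covered = max(covered, fp[1] + fp[2])
--     prev = fp
--   if size > best_size:
--     best_size = size
--     best_pos = fps[(start + len(fps)) // 2][0]
--   return {'size': best_size, 'pos': best_pos}
-- ===== Notes on version B (the rewrite author's own statement) =====
-- stated objective: alternative
-- what changed: B never materializes clusters or calls process_overlap: it scores the current cluster incrementally in the same scan (running size/covered accumulators reset at each gap) and recovers the cluster's median position by index arithmetic into the sorted array (fps[(start+i)//2]), keeping only O(1) extra state, while A builds each cluster as a list and re-scans it with a helper.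
import Mathlib
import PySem

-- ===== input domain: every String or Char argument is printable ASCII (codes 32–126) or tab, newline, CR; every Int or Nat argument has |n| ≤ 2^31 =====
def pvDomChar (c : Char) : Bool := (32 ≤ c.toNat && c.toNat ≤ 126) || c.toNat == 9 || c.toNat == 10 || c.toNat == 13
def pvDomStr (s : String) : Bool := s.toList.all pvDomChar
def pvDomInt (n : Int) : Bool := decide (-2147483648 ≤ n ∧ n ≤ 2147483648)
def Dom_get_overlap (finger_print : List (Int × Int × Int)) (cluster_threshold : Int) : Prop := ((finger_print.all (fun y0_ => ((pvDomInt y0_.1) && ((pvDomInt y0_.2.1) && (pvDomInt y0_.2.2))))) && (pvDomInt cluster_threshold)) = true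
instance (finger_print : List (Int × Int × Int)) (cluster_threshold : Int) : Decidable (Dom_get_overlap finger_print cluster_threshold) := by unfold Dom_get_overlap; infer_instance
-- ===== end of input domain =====

-- B fuses clustering and scoring into one scan with O(1) extra state (running size/covered
-- reset at each gap, median recovered by index arithmetic into the sorted array), instead of
-- A's cluster lists each re-scanned by process_overlap. Objective: alternative.

-- ===== PORT A =====
-- fold step of process_overlap's loop: state (covered, size)
def pvProcStep (cs : Int × Int) (m : Int × Int × Int) : Int × Int :=
  (max cs.1 (m.2.1 + m.2.2), cs.2 + m.2.2 - min (max (cs.1 - m.2.1) 0) m.2.2)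

-- helper process_overlap of A's Python
def pvProcessOverlapA (overlap : List (Int × Int × Int)) : List (String × Int) :=
  if PySem.List.len overlap == 0 then [("size", 0), ("pos", 0)]
  else
    let st := overlap.foldl pvProcStep (0, 0)
    [("size", st.2),
     ("pos", (PySem.List.pyGetD overlap (PySem.Int.floordiv (PySem.List.len overlap) 2) (0, 0, 0)).1)]

-- overlap['size'] access
def pvSize (r : List (String × Int)) : Int := PySem.Dict.getD (PySem.Dict.mk r) "size" (0 : Int)

-- the body of A's loop, state (best_overlap, overlap)
def pvStepA (thr : Int) (s : List (String × Int) × List (Int × Int × Int))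
    (fp : Int × Int × Int) : List (String × Int) × List (Int × Int × Int) :=
  if PySem.List.len s.2 == 0 then (s.1, s.2 ++ [fp])
  else if fp.1 - (PySem.List.pyGetD s.2 (-1) (0, 0, 0)).1 > thr then
    let o := pvProcessOverlapA s.2
    (if pvSize o > pvSize s.1 then o else s.1, [fp])
  else (s.1, s.2 ++ [fp])

def get_overlap (finger_print : List (Int × Int × Int)) (cluster_threshold : Int) : List (String × Int) :=
  let fps := PySem.List.sorted (PySem.Set.ofList finger_print)
      (fun t => toLex (t.1, toLex (t.2.1, t.2.2))) false
  let st := fps.foldl (pvStepA cluster_threshold) ([("size", 0), ("pos", 0)], [])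
  let o := pvProcessOverlapA st.2
  if pvSize o > pvSize st.1 then o else st.1

-- ===== PORT B =====
-- B's loop state: best_size, best_pos, start index, running size, running covered, previous fp
structure PvSt where
  bs : Int
  bp : Int
  start : Int
  size : Int
  covered : Int
  prev : Option (Int × Int × Int)
deriving DecidableEq, Repr

-- the body of B's loop over enumerate(fps)
def pvStepB (fps : List (Int × Int × Int)) (thr : Int) (s : PvSt)
    (p : Int × (Int × Int × Int)) : PvSt :=
  let i := p.1
  let fp := p.2
  let s :=
    match s.prev with
    | some pv =>
      if fp.1 - pv.1 > thr then
        let s := if s.size > s.bs then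
            { s with bs := s.size,
                     bp := (PySem.List.pyGetD fps (PySem.Int.floordiv (s.start + i) 2) (0, 0, 0)).1 }
          else s
        { s with start := i, size := 0, covered := 0 }
      else s
    | none => s
  { s with size := s.size + fp.2.2 - min (max (s.covered - fp.2.1) 0) fp.2.2,
           covered := max s.covered (fp.2.1 + fp.2.2),
           prev := some fp }

def get_overlap_alt (finger_print : List (Int × Int × Int)) (cluster_threshold : Int) : List (String × Int) :=
  let fps := PySem.List.sorted (PySem.Set.ofList finger_print)
      (fun t => toLex (t.1, toLex (t.2.1, t.2.2))) false
  let s := (PySem.List.enumerate fps).foldl (pvStepB fps cluster_threshold) ⟨0, 0, 0, 0, 0, none⟩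
  if s.size > s.bs then
    [("size", s.size),
     ("pos", (PySem.List.pyGetD fps (PySem.Int.floordiv (s.start + PySem.List.len fps) 2) (0, 0, 0)).1)]
  else [("size", s.bs), ("pos", s.bp)]

-- ===== PRECONDITION & SPEC =====
def Spec_get_overlap (finger_print : List (Int × Int × Int)) (cluster_threshold : Int) (out : List (String × Int)) : Prop := out = get_overlap_alt finger_print cluster_threshold
instance (finger_print : List (Int × Int × Int)) (cluster_threshold : Int) (out : List (String × Int)) : Decidable (Spec_get_overlap finger_print cluster_threshold out) := by unfold Spec_get_overlap; infer_instance

-- ===== CLAIM =====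
def Claim_equal_get_overlap : Prop := ∀ (finger_print : List (Int × Int × Int)) (cluster_threshold : Int), Dom_get_overlap finger_print cluster_threshold → Spec_get_overlap finger_print cluster_threshold (get_overlap finger_print cluster_threshold)

-- ===== LEMMAS AND PROOFS =====

theorem pvSize_pair (a b : Int) : pvSize [("size", a), ("pos", b)] = a := rfl

-- the global median index B computes equals the cluster-local one A computes
theorem pvIdx (pre cur rest : List (Int × Int × Int)) (h : cur ≠ []) (d : Int × Int × Int) :
    PySem.List.pyGetD (pre ++ (cur ++ rest))
      (PySem.Int.floordiv ((pre.length : Int) + ((pre.length : Int) + (cur.length : Int))) 2) d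
    = PySem.List.pyGetD cur (PySem.Int.floordiv (PySem.List.len cur) 2) d := by
  have hm : 1 ≤ cur.length := List.length_pos_iff.mpr h
  have h1 : (pre.length : Int) + ((pre.length : Int) + (cur.length : Int))
      = ((2 * pre.length + cur.length : Nat) : Int) := by push_cast; ring
  have e1 : PySem.Int.floordiv ((2 * pre.length + cur.length : Nat) : Int) 2
      = (((2 * pre.length + cur.length) / 2 : Nat) : Int) := by
    rw [PySem.Int.floordiv_eq_ediv_of_pos (by norm_num)]
    omega
  have e2 : PySem.Int.floordiv (PySem.List.len cur) 2 = ((cur.length / 2 : Nat) : Int) := by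
    rw [PySem.List.len_eq, PySem.Int.floordiv_eq_ediv_of_pos (by norm_num)]
    omega
  rw [h1, e1, e2, PySem.List.pyGetD_natCast, PySem.List.pyGetD_natCast]
  have hsplit : (2 * pre.length + cur.length) / 2 = pre.length + cur.length / 2 := by omega
  have hlt : cur.length / 2 < cur.length := by omega
  rw [hsplit]
  simp only [List.getD]
  rw [List.getElem?_append_right (by omega), Nat.add_sub_cancel_left,
    List.getElem?_append_left hlt]

-- main loop invariant: A's tail run + final flush equals B's tail run + final flush
theorem pvMain (fps : List (Int × Int × Int)) (thr : Int) :
    ∀ (rest pre cur : List (Int × Int × Int)) (bs bp : Int) (h : cur ≠ []),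
    fps = pre ++ (cur ++ rest) →
    (let st := rest.foldl (pvStepA thr) ([("size", bs), ("pos", bp)], cur)
     let o := pvProcessOverlapA st.2
     if pvSize o > pvSize st.1 then o else st.1)
    =
    (let s := (PySem.List.enumerate rest ((pre.length : Int) + (cur.length : Int))).foldl
        (pvStepB fps thr)
        ⟨bs, bp, (pre.length : Int), (cur.foldl pvProcStep (0, 0)).2,
          (cur.foldl pvProcStep (0, 0)).1, some (cur.getLast h)⟩
     if s.size > s.bs then
       [("size", s.size),
        ("pos", (PySem.List.pyGetD fps (PySem.Int.floordiv (s.start + PySem.List.len fps) 2) (0, 0, 0)).1)]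
     else [("size", s.bs), ("pos", s.bp)]) := by
  intro rest
  induction rest with
  | nil =>
    intro pre cur bs bp h hsplit
    simp only [List.foldl_nil, PySem.List.enumerate, List.foldl_nil]
    have hlen : (PySem.List.len cur == 0) = false := by
      simp [PySem.List.len_eq, List.length_eq_zero_iff, h]
    simp only [pvProcessOverlapA, hlen, Bool.false_eq_true, if_false, pvSize_pair]
    have hpos : PySem.List.pyGetD fps
        (PySem.Int.floordiv ((pre.length : Int) + PySem.List.len fps) 2) (0, 0, 0)
        = PySem.List.pyGetD cur (PySem.Int.floordiv (PySem.List.len cur) 2) (0, 0, 0) := by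
      have hl : PySem.List.len fps = (pre.length : Int) + (cur.length : Int) := by
        simp [hsplit, PySem.List.len_eq]
      rw [hl, hsplit]
      exact pvIdx pre cur [] h (0, 0, 0)
    rw [hpos]
  | cons fp rest ih =>
    intro pre cur bs bp h hsplit
    have hlen : (PySem.List.len cur == 0) = false := by
      simp [PySem.List.len_eq, List.length_eq_zero_iff, h]
    have hlast : PySem.List.pyGetD cur (-1) ((0 : Int), (0 : Int), (0 : Int)) = cur.getLast h :=
      PySem.List.pyGetD_neg_one _ _ h
    rw [PySem.List.enumerate_cons]
    simp only [List.foldl_cons]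
    by_cases hg : fp.1 - (cur.getLast h).1 > thr
    · -- gap: A flushes cluster, B flushes accumulators
      have hA : pvStepA thr ([("size", bs), ("pos", bp)], cur) fp
          = (if (cur.foldl pvProcStep (0, 0)).2 > bs then
               [("size", (cur.foldl pvProcStep (0, 0)).2),
                ("pos", (PySem.List.pyGetD cur (PySem.Int.floordiv (PySem.List.len cur) 2) (0, 0, 0)).1)]
             else [("size", bs), ("pos", bp)], [fp]) := by
        simp only [pvStepA, hlen, Bool.false_eq_true, if_false, hlast, if_pos hg,
          pvProcessOverlapA, pvSize_pair]
      have hB : pvStepB fps thr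
          ⟨bs, bp, (pre.length : Int), (cur.foldl pvProcStep (0, 0)).2,
            (cur.foldl pvProcStep (0, 0)).1, some (cur.getLast h)⟩
          (((pre.length : Int) + (cur.length : Int)), fp)
          = ⟨(if (cur.foldl pvProcStep (0, 0)).2 > bs then (cur.foldl pvProcStep (0, 0)).2 else bs),
             (if (cur.foldl pvProcStep (0, 0)).2 > bs then
                (PySem.List.pyGetD fps
                  (PySem.Int.floordiv ((pre.length : Int) + ((pre.length : Int) + (cur.length : Int))) 2)
                  (0, 0, 0)).1
              else bp),
             ((pre.length : Int) + (cur.length : Int)),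
             0 + fp.2.2 - min (max (0 - fp.2.1) 0) fp.2.2,
             max 0 (fp.2.1 + fp.2.2), some fp⟩ := by
        simp only [pvStepB, if_pos hg]
        split_ifs <;> rfl
      rw [hA, hB]
      have hidx : (PySem.List.pyGetD fps
            (PySem.Int.floordiv ((pre.length : Int) + ((pre.length : Int) + (cur.length : Int))) 2)
            (0, 0, 0)).1
          = (PySem.List.pyGetD cur (PySem.Int.floordiv (PySem.List.len cur) 2) (0, 0, 0)).1 := by
        rw [hsplit]; exact congrArg Prod.fst (pvIdx pre cur (fp :: rest) h (0, 0, 0))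
      have hsplit' : fps = (pre ++ cur) ++ ([fp] ++ rest) := by
        simpa [List.append_assoc] using hsplit
      have hcast : ((pre.length : Int) + (cur.length : Int)) = (((pre ++ cur).length : Nat) : Int) := by
        simp
      have hcast2 : ((pre.length : Int) + (cur.length : Int)) + 1
          = (((pre ++ cur).length : Nat) : Int) + (([fp].length : Nat) : Int) := by
        simp
      by_cases hc : (cur.foldl pvProcStep (0, 0)).2 > bs
      · simp only [if_pos hc]
        rw [hidx]
        have := ih (pre ++ cur) [fp] (cur.foldl pvProcStep (0, 0)).2
          (PySem.List.pyGetD cur (PySem.Int.floordiv (PySem.List.len cur) 2) (0, 0, 0)).1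
          (by simp) hsplit'
        rw [this, hcast2, hcast]
        rfl
      · simp only [if_neg hc]
        have := ih (pre ++ cur) [fp] bs bp (by simp) hsplit'
        rw [this, hcast2, hcast]
        rfl
    · -- no gap: both extend the current cluster
      have hA : pvStepA thr ([("size", bs), ("pos", bp)], cur) fp
          = ([("size", bs), ("pos", bp)], cur ++ [fp]) := by
        simp only [pvStepA, hlen, Bool.false_eq_true, if_false, hlast, if_neg hg]
      have hB : pvStepB fps thr
          ⟨bs, bp, (pre.length : Int), (cur.foldl pvProcStep (0, 0)).2,
            (cur.foldl pvProcStep (0, 0)).1, some (cur.getLast h)⟩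
          (((pre.length : Int) + (cur.length : Int)), fp)
          = ⟨bs, bp, (pre.length : Int),
             (cur.foldl pvProcStep (0, 0)).2 + fp.2.2
               - min (max ((cur.foldl pvProcStep (0, 0)).1 - fp.2.1) 0) fp.2.2,
             max (cur.foldl pvProcStep (0, 0)).1 (fp.2.1 + fp.2.2), some fp⟩ := by
        simp only [pvStepB, if_neg hg]
      rw [hA, hB]
      have hsplit' : fps = pre ++ ((cur ++ [fp]) ++ rest) := by
        simpa [List.append_assoc] using hsplit
      have hfold : (cur ++ [fp]).foldl pvProcStep (0, 0) = pvProcStep (cur.foldl pvProcStep (0, 0)) fp := by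
        simp
      have hgl : (cur ++ [fp]).getLast (by simp) = fp := by
        simp
      have hcast : ((pre.length : Int) + (cur.length : Int)) + 1
          = ((pre.length : Nat) : Int) + (((cur ++ [fp]).length : Nat) : Int) := by
        simp
        omega
      have := ih pre (cur ++ [fp]) bs bp (by simp) hsplit'
      rw [this, hfold, hgl, hcast]
      rfl

-- ===== VERDICT =====
theorem get_overlap_spec : Claim_equal_get_overlap := by
  intro fp thr _
  unfold Spec_get_overlap get_overlap get_overlap_alt
  generalize (PySem.List.sorted (PySem.Set.ofList fp)
      (fun t => toLex (t.1, toLex (t.2.1, t.2.2))) false) = l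
  cases l with
  | nil => rfl
  | cons h t =>
    exact pvMain (h :: t) thr t [] [h] 0 0 (by simp) (by simp)
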